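-- pv_equiv track=rewrite | github.com/declanreed2029/Mech-Eng-224 | Activity2/part2.py | largest_digit
-- ===== SOURCE A (Python) =====
-- def largest_digit(lst):
--     """Finds the string with the largest digit in the list of strings lst
--
--     If there are no strings with digits in lst, returns the empty string ''
--     All strings in lst must consist only of digits (0-9)
--
--     For example, running largest_digit on ['11', '02'] should return '02'
--
--     If there are multiple strings with the highest digit in lst
--       largest_digit will return the first (left-most) of these strings
--
--     Args:
--         lst (list[str]): the list of strings to search
--
--     Returns:
--         str: the string with the highest digit among all strings in lst
--     """
--     largest = -1
--     result = ''
--     for s in lst: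
--         for letter in s:
--             if int(letter) > largest:
--                 result = s
--                 largest = int(letter)
--     return result
-- ===== SOURCE B (Python) =====
-- def largest_digit(lst):
--     # Staged approach: pass 1 computes the global maximum digit over all
--     # characters; pass 2 returns the first string containing that digit.
--     digits = [int(c) for s in lst for c in s]
--     if not digits:
--         return ''
--     m = max(digits)
--     for s in lst:
--         if any(int(c) == m for c in s):
--             return s
--     return ''
-- ===== Notes on version B (the rewrite author's own statement) =====
-- stated objective: alternative
-- what changed: Replaced A's single stateful pass carrying (largest, result) by two staged passes: first compute the global maximum digit over all characters, then scan for the first string containing that digit.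
import Mathlib
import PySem

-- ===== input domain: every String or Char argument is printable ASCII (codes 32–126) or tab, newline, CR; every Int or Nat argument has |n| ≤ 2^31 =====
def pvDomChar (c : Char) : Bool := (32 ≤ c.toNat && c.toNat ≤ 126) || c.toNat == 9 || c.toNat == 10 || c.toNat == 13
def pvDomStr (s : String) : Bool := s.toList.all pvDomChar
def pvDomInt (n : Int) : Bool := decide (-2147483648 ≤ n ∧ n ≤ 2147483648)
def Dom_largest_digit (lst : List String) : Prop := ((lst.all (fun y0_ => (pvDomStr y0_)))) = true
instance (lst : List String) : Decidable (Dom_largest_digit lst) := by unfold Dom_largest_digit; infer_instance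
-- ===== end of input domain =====

-- B replaces A's single stateful pass by two staged passes (global max digit, then first string containing it).

-- int(letter) for a single character: exact for digit characters '0'..'9', the only ones Pre_ admits
def pvDigitVal (c : Char) : Int := (c.toNat : Int) - 48

-- ===== PORT A =====
def largest_digit (lst : List String) : String :=
  (lst.foldl
    (fun (st : Int × String) s =>
      s.toList.foldl
        (fun (st2 : Int × String) letter =>
          if pvDigitVal letter > st2.1 then (pvDigitVal letter, s) else st2)
        st)
    (-1, "")).2

-- ===== PORT B =====
-- the second loop: first string with a character of value m, else ''
def pvFindFirst (lst : List String) (m : Int) : String :=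
  match lst with
  | [] => ""
  | s :: t => if s.toList.any (fun c => pvDigitVal c == m) then s else pvFindFirst t m

def largest_digit_alt (lst : List String) : String :=
  let digits := lst.flatMap (fun s => s.toList.map pvDigitVal)
  match digits with
  | [] => ""
  | d :: ds => pvFindFirst lst (ds.foldl max d)   -- max(nonempty list) is the running max

-- ===== PRECONDITION & SPEC =====
-- Pre_ excludes exactly the inputs where Python A (and B) raise ValueError: any non-digit character.
def Pre_largest_digit (lst : List String) : Prop :=
  (lst.all (fun s => s.toList.all (fun c => 48 ≤ c.toNat && c.toNat ≤ 57))) = true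
instance (lst : List String) : Decidable (Pre_largest_digit lst) := by unfold Pre_largest_digit; infer_instance

def pvWitness_largest_digit : List String := ["907", "", "35"]

def Spec_largest_digit (lst : List String) (out : String) : Prop := out = largest_digit_alt lst
instance (lst : List String) (out : String) : Decidable (Spec_largest_digit lst out) := by unfold Spec_largest_digit; infer_instance

-- ===== CLAIM (what is proved, stated in full; the proofs are below) =====
def Claim_equal_largest_digit : Prop := ∀ (lst : List String), Dom_largest_digit lst → Pre_largest_digit lst → Spec_largest_digit lst (largest_digit lst)

-- ===== LEMMAS AND PROOFS =====

-- the flattened digit-value stream, proof-side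
def pvFlat (lst : List String) : List Int := lst.flatMap (fun s => s.toList.map pvDigitVal)

-- if the running max strictly improved, the final value is attained by a list element
lemma pvMax_attained (xs : List Int) : ∀ (L : Int), L < xs.foldl max L → xs.foldl max L ∈ xs := by
  induction xs with
  | nil => intro L h; simp at h
  | cons x t ih =>
    intro L h
    simp only [List.foldl_cons] at h ⊢
    by_cases hx : max L x < t.foldl max (max L x)
    · exact List.mem_cons_of_mem x (ih (max L x) hx)
    · have hle : max L x ≤ t.foldl max (max L x) := (PySem.List.le_foldl_max t (max L x)).1
      have he : t.foldl max (max L x) = max L x := le_antisymm (le_of_not_gt hx) hle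
      rw [he] at h ⊢
      have : max L x = x := by omega
      rw [this]; exact List.mem_cons_self

-- A's inner loop over one string's characters, from state (L, r)
lemma inner_eq (s : String) (cs : List Char) (L : Int) (r : String) :
    cs.foldl (fun (st2 : Int × String) letter =>
        if pvDigitVal letter > st2.1 then (pvDigitVal letter, s) else st2) (L, r)
      = ((cs.map pvDigitVal).foldl max L,
         if L < (cs.map pvDigitVal).foldl max L then s else r) := by
  induction cs generalizing L r with
  | nil => simp
  | cons d t ih =>
    simp only [List.foldl_cons, List.map_cons]
    by_cases h : pvDigitVal d > L
    · rw [if_pos h, ih]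
      have hmax : max L (pvDigitVal d) = pvDigitVal d := max_eq_right (le_of_lt h)
      simp only [hmax]
      have hle : pvDigitVal d ≤ (t.map pvDigitVal).foldl max (pvDigitVal d) :=
        (PySem.List.le_foldl_max (t.map pvDigitVal) (pvDigitVal d)).1
      have : L < (t.map pvDigitVal).foldl max (pvDigitVal d) := lt_of_lt_of_le h hle
      simp [this]
    · rw [if_neg h, ih]
      have hmax : max L (pvDigitVal d) = L := max_eq_left (le_of_not_gt h)
      simp only [hmax]

-- main correspondence: A's outer fold versus (global running max, first string attaining it)
lemma outer_eq (lst : List String) : ∀ (L : Int) (r : String),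
    lst.foldl
      (fun (st : Int × String) s =>
        s.toList.foldl
          (fun (st2 : Int × String) letter =>
            if pvDigitVal letter > st2.1 then (pvDigitVal letter, s) else st2)
          st)
      (L, r)
    = ((pvFlat lst).foldl max L,
       if L < (pvFlat lst).foldl max L then pvFindFirst lst ((pvFlat lst).foldl max L) else r) := by
  induction lst with
  | nil => intro L r; simp [pvFlat]
  | cons s t ih =>
    intro L r
    have hflat : pvFlat (s :: t) = s.toList.map pvDigitVal ++ pvFlat t := by
      simp [pvFlat]
    simp only [List.foldl_cons]
    rw [inner_eq s s.toList L r, ih]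
    set vs := s.toList.map pvDigitVal with hvs
    set Ls := vs.foldl max L with hLs
    have hM : (pvFlat (s :: t)).foldl max L = (pvFlat t).foldl max Ls := by
      rw [hflat, List.foldl_append]
    set M := (pvFlat t).foldl max Ls with hMdef
    rw [hM]
    have hLleLs : L ≤ Ls := (PySem.List.le_foldl_max vs L).1
    have hLsleM : Ls ≤ M := (PySem.List.le_foldl_max (pvFlat t) Ls).1
    have hvsle : ∀ v ∈ vs, v ≤ Ls := (PySem.List.le_foldl_max vs L).2
    by_cases h1 : Ls < M
    · -- global max not attained in s: skip s in the search
      have hL : L < M := lt_of_le_of_lt hLleLs h1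
      have hnone : (s.toList.any (fun c => pvDigitVal c == M)) = false := by
        simp only [List.any_eq_false, beq_iff_eq]
        intro c hc
        have : pvDigitVal c ∈ vs := by rw [hvs]; exact List.mem_map_of_mem hc
        have := hvsle _ this
        omega
      have hff : pvFindFirst (s :: t) M = pvFindFirst t M := by
        simp [pvFindFirst, hnone]
      simp [h1, hL, hff]
    · have hLsM : Ls = M := le_antisymm hLsleM (le_of_not_gt h1)
      by_cases h2 : L < Ls
      · -- max attained inside s: search stops at s
        have hmem : Ls ∈ vs := by rw [hLs] at h2 ⊢; exact pvMax_attained vs L h2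
        have hany : (s.toList.any (fun c => pvDigitVal c == M)) = true := by
          rw [← hLsM]
          rw [hvs] at hmem
          obtain ⟨c, hc, hcv⟩ := List.mem_map.mp hmem
          exact List.any_eq_true.mpr ⟨c, hc, by simp [hcv]⟩
        have hL : L < M := hLsM ▸ h2
        have hff : pvFindFirst (s :: t) M = s := by simp [pvFindFirst, hany]
        simp [h1, h2, hL, hff]
      · -- nothing improved anywhere
        have hLM : ¬ L < M := by omega
        simp [h1, h2, hLM]

-- ===== VERDICT (by name: the statement is the Claim_ definition above) =====
theorem largest_digit_spec : Claim_equal_largest_digit := by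
  intro lst _ hpre
  unfold Spec_largest_digit largest_digit
  rw [outer_eq lst (-1) ""]
  have halt : largest_digit_alt lst = (match pvFlat lst with
    | [] => ""
    | d :: ds => pvFindFirst lst (ds.foldl max d)) := rfl
  rw [halt]
  unfold Pre_largest_digit at hpre
  simp only [List.all_eq_true, Bool.and_eq_true, decide_eq_true_eq] at hpre
  have hnn : ∀ v ∈ pvFlat lst, (0 : Int) ≤ v := by
    intro v hv
    unfold pvFlat at hv
    obtain ⟨s, hs, hv'⟩ := List.mem_flatMap.mp hv
    obtain ⟨c, hc, hcv⟩ := List.mem_map.mp hv'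
    have := hpre s hs c hc
    unfold pvDigitVal at hcv
    omega
  cases hfl : pvFlat lst with
  | nil => simp
  | cons d ds =>
    have hd0 : (0 : Int) ≤ d := hnn d (by rw [hfl]; exact List.mem_cons_self)
    have hmax1 : max (-1 : Int) d = d := by omega
    have hstep : (d :: ds).foldl max (-1) = ds.foldl max d := by
      simp only [List.foldl_cons, hmax1]
    have hdm : d ≤ ds.foldl max d := (PySem.List.le_foldl_max ds d).1
    have hlt : (-1 : Int) < ds.foldl max d := by omega
    simp only [hstep, if_pos hlt]
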